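-- pv_equiv track=rewrite | github.com/ksh4030/coding-test | 프로그래머스/1/134240. 푸드 파이트 대회/푸드 파이트 대회.py | solution
-- ===== SOURCE A (Python) =====
-- def solution(food):
--     answer = ''
--
--     for i in range(1, len(food)) :
--         n = food[i] // 2
--         for j in range(n) :
--             answer += str(i)
--
--     arr = sorted(answer, reverse = True)
--
--     answer += '0'
--
--     for n in arr :
--         answer += str(n)
--
--     return answer
-- ===== SOURCE B (Python) =====
-- def solution(food):
--     left = ''.join(str(i) * (food[i] // 2) for i in range(1, len(food)))
--     counts = {}
--     for ch in left:
--         counts[ch] = counts.get(ch, 0) + 1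
--     right = ''.join(d * counts.get(d, 0) for d in '9876543210')
--     return left + '0' + right
-- ===== Notes on version B (the rewrite author's own statement) =====
-- stated objective: faster
-- what changed: B builds the left half with a join over generated chunks and replaces A's comparison sort of the answer's characters (plus a char-by-char append loop) by a counting sort: one frequency-dict pass over the left half and an emission pass over the fixed descending digit alphabet '9'..'0'.
import Mathlib
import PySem

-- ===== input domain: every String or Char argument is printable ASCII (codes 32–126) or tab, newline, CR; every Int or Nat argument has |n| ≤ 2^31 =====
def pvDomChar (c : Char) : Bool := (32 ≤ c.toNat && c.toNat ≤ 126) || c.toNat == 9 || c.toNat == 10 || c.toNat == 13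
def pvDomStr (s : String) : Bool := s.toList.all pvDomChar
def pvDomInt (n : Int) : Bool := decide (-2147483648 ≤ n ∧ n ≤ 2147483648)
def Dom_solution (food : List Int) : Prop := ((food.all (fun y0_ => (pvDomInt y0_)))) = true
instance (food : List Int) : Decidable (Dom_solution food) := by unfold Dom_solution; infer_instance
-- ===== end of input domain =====

-- B replaces A's comparison sort of the left half's characters by a one-pass frequency
-- count and a descending-digit emission (counting sort); same return value, different algorithm.

-- ===== PORT A =====
def solution (food : List Int) : String :=
  let answer : String :=
    (PySem.List.pyRange 1 (food.length : Int) 1).foldl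
      (fun answer i =>
        -- n = food[i] // 2   (i ∈ range(1, len(food)), so the index is always in range)
        let n := PySem.Int.floordiv (PySem.List.pyGetD food i 0) 2
        -- for j in range(n): answer += str(i)
        (PySem.List.pyRange 0 n 1).foldl (fun a _ => a ++ PySem.Int.toStr i) answer)
      ""
  -- arr = sorted(answer, reverse=True)
  let arr := PySem.List.sorted answer.toList (fun c => c) true
  let answer2 := answer ++ "0"
  -- for n in arr: answer += str(n)   (str of a 1-char string is itself)
  arr.foldl (fun a c => a ++ String.singleton c) answer2

-- ===== PORT B =====
def solution_alt (food : List Int) : String :=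
  -- left = ''.join(str(i) * (food[i] // 2) for i in range(1, len(food)))
  let left : String :=
    PySem.Str.join ""
      ((PySem.List.pyRange 1 (food.length : Int) 1).map
        (fun i =>
          -- str(i) * n : n concatenated copies, exact (n ≤ 0 gives "")
          PySem.Str.join ""
            (List.replicate (PySem.Int.floordiv (PySem.List.pyGetD food i 0) 2).toNat
              (PySem.Int.toStr i))))
  -- counts[ch] = counts.get(ch, 0) + 1 for ch in left
  let counts : PySem.Dict Char Int :=
    left.toList.foldl (fun d ch => d.insert ch (d.getD ch 0 + 1)) PySem.Dict.empty
  -- right = ''.join(d * counts.get(d, 0) for d in '9876543210')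
  let right : String :=
    PySem.Str.join ""
      ((("9876543210" : String).toList).map
        (fun d =>
          -- d * m : the 1-char string d repeated m times, exact (m ≤ 0 gives "")
          String.ofList (List.replicate (counts.getD d 0).toNat d)))
  left ++ "0" ++ right

-- ===== PRECONDITION & SPEC =====
def Spec_solution (food : List Int) (out : String) : Prop := out = solution_alt food
instance (food : List Int) (out : String) : Decidable (Spec_solution food out) := by unfold Spec_solution; infer_instance

-- ===== CLAIM (what is proved, stated in full; the proofs are below) =====
def Claim_equal_solution : Prop := ∀ (food : List Int), Dom_solution food → Spec_solution food (solution food)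

-- ===== LEMMAS AND PROOFS =====

-- the digit alphabet B iterates over, descending
def pvRDigits : List Char := ("9876543210" : String).toList

-- ''.join with empty separator is flatten (on the char lists)
theorem pv_join_empty (parts : List String) :
    (PySem.Str.join "" parts).toList = (parts.map String.toList).flatten := by
  induction parts with
  | nil => simp [PySem.Str.join, PySem.Chars.join, List.intercalate]
  | cons p ps ih =>
    simp [PySem.Str.join, PySem.Chars.join, List.intercalate] at *
    cases ps with
    | nil => simp
    | cons q qs => simp_all

-- the inner 'for j in range(n): a += s' loop appends n copies of s
theorem pv_rep_app (m : List Int) (s acc : String) :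
    (m.foldl (fun a _ => a ++ s) acc).toList
      = acc.toList ++ (List.replicate m.length s.toList).flatten := by
  induction m generalizing acc with
  | nil => simp
  | cons x xs ih => simp [ih, List.replicate_succ, List.flatten_cons]

-- the final 'for c in arr: a += c' loop appends arr
theorem pv_push_app (l : List Char) (init : String) :
    (l.foldl (fun a c => a ++ String.singleton c) init).toList = init.toList ++ l := by
  induction l generalizing init with
  | nil => simp
  | cons c cs ih => rw [List.foldl_cons, ih]; simp

-- A's left-half builder, as a flatMap
theorem pv_leftA (l : List Int) (f : Int → Int) (init : String) :
    (l.foldl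
        (fun answer i =>
          (PySem.List.pyRange 0 (f i) 1).foldl (fun a _ => a ++ PySem.Int.toStr i) answer)
        init).toList
      = init.toList
        ++ l.flatMap (fun i => (List.replicate (f i).toNat (PySem.Int.toChars i)).flatten) := by
  induction l generalizing init with
  | nil => simp
  | cons x xs ih =>
    rw [List.foldl_cons, ih, pv_rep_app]
    simp [PySem.List.length_pyRange_one, PySem.Int.toList_toStr]

-- every character of str(i) for i >= 1 is a decimal digit
theorem pv_digitChar_mem (n : Nat) (h : n < 10) : n.digitChar ∈ pvRDigits := by
  interval_cases n <;> decide

theorem pv_toDigitsCore_mem (fuel : Nat) : ∀ (n : Nat) (acc : List Char),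
    (∀ c ∈ acc, c ∈ pvRDigits) →
    ∀ c ∈ Nat.toDigitsCore 10 fuel n acc, c ∈ pvRDigits := by
  induction fuel with
  | zero => intro n acc hacc c hc; rw [Nat.toDigitsCore] at hc; exact hacc c hc
  | succ fuel ih =>
    intro n acc hacc c hc
    rw [Nat.toDigitsCore] at hc
    by_cases h10 : n / 10 = 0
    · simp only [h10] at hc
      rcases List.mem_cons.mp hc with h | h
      · exact h ▸ pv_digitChar_mem _ (Nat.mod_lt _ (by norm_num))
      · exact hacc c h
    · simp only [h10] at hc
      exact ih _ _ (fun d hd => by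
        rcases List.mem_cons.mp hd with h | h
        · exact h ▸ pv_digitChar_mem _ (Nat.mod_lt _ (by norm_num))
        · exact hacc d h) c hc

theorem pv_toChars_mem (i : Int) (h : 1 ≤ i) : ∀ c ∈ PySem.Int.toChars i, c ∈ pvRDigits := by
  intro c hc
  rw [PySem.Int.toChars, if_neg (by omega)] at hc
  exact pv_toDigitsCore_mem _ _ _ (by simp) c hc

-- counting emission: counts per character
theorem pv_count_emit (f : Char → Nat) (ds : List Char) (hnd : ds.Nodup) (c : Char) :
    (ds.flatMap (fun d => List.replicate (f d) d)).count c = if c ∈ ds then f c else 0 := by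
  induction ds with
  | nil => simp
  | cons d t ih =>
    rcases List.nodup_cons.mp hnd with ⟨hdm, hnd'⟩
    simp only [List.flatMap_cons, List.count_append, ih hnd', List.count_replicate,
      List.mem_cons]
    by_cases hcd : c = d
    · subst hcd; simp [hdm]
    · simp [hcd, Ne.symm hcd]

-- counting emission over a strictly descending alphabet is descending
theorem pv_emit_pairwise (f : Char → Nat) (ds : List Char) (h : ds.Pairwise (· > ·)) :
    (ds.flatMap (fun d => List.replicate (f d) d)).Pairwise (fun a b : Char => b ≤ a) := by
  induction ds with
  | nil => simp
  | cons d t ih =>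
    rcases List.pairwise_cons.mp h with ⟨hd, ht⟩
    rw [List.flatMap_cons, List.pairwise_append]
    refine ⟨List.pairwise_replicate.mpr (Or.inr le_rfl), ih ht, ?_⟩
    intro a ha b hb
    rcases List.mem_flatMap.mp hb with ⟨e, he, hbe⟩
    have := List.eq_of_mem_replicate ha
    have := List.eq_of_mem_replicate hbe
    subst_vars
    exact le_of_lt (hd e he)

-- the heart: sorted(L, reverse=True) equals the counting-sort emission for digit-only L
theorem pv_sorted_eq_emit (L : List Char) (hL : ∀ c ∈ L, c ∈ pvRDigits) :
    PySem.List.sorted L (fun c => c) true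
      = pvRDigits.flatMap (fun d => List.replicate (L.count d) d) := by
  have hnd : pvRDigits.Nodup := by decide
  have hperm : (pvRDigits.flatMap (fun d => List.replicate (L.count d) d)).Perm L := by
    rw [List.perm_iff_count]
    intro c
    rw [pv_count_emit _ _ hnd]
    by_cases hc : c ∈ pvRDigits
    · simp [hc]
    · simp [hc, List.count_eq_zero.mpr (fun hcl => hc (hL c hcl))]
  refine List.Perm.eq_of_pairwise (fun a b _ _ h1 h2 => le_antisymm h2 h1)
    (PySem.List.sorted_pairwise_rev L _) (pv_emit_pairwise _ _ (by decide))
    ((PySem.List.sorted_perm L _ _).trans hperm.symm)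

-- ===== VERDICT (by name: the statement is the Claim_ definition above) =====
theorem solution_spec : Claim_equal_solution := by
  unfold Claim_equal_solution
  intro food _
  unfold Spec_solution solution solution_alt
  apply String.toList_inj.mp
  have h0 : ("0" : String).toList = ['0'] := by decide
  rw [pv_push_app]
  simp only [String.toList_append, h0, pv_join_empty, List.map_map, Function.comp_def,
    String.toList_ofList, PySem.Int.toList_toStr, List.map_replicate,
    PySem.Dict.getD_foldl_insert_add_one]
  rw [pv_leftA]
  have he : ("" : String).toList = ([] : List Char) := by decide
  have hg : ∀ x : Char, (PySem.Dict.empty : PySem.Dict Char Int).getD x 0 = 0 := fun _ => by simp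
  simp only [he, List.nil_append, hg, zero_add, Int.toNat_natCast, ← List.flatMap_def]
  set E := List.flatMap
      (fun i =>
        (List.replicate (PySem.Int.floordiv (PySem.List.pyGetD food i 0) 2).toNat
          (PySem.Int.toChars i)).flatten)
      (PySem.List.pyRange 1 (food.length : Int)) with hE
  have hdig : ∀ c ∈ E, c ∈ pvRDigits := by
    intro c hc
    rcases List.mem_flatMap.mp hc with ⟨i, hi, hci⟩
    rcases List.mem_flatten.mp hci with ⟨l, hl, hcl⟩
    have hli := List.eq_of_mem_replicate hl
    subst hli
    exact pv_toChars_mem i (PySem.List.mem_pyRange_one.mp hi).1 c hcl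
  have hs := pv_sorted_eq_emit E hdig
  simp only [pvRDigits] at hs
  rw [hs]
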